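-- pv_equiv track=rewrite | github.com/ldct/cp | codeforces/1372/B/B.py | ans_slow
-- ===== SOURCE A (Python) =====
-- from math import gcd
--
-- def lcm(a, b):
--     return a*b // gcd(a, b)
--
-- def ans_slow(n):
--
--     smallest_lcm = float("inf")
--     smallest_pair = None
--
--     for a in range(1,n):
--         b = n - a
--         if lcm(a, b) < smallest_lcm:
--             smallest_lcm = lcm(a, b)
--             smallest_pair = (a, b)
--
--     return tuple(sorted(smallest_pair))
-- ===== SOURCE B (Python) =====
-- def ans_slow(n):
--     # smallest prime factor search: the optimal pair is (n//p, n - n//p)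
--     # where p is the smallest prime factor of n (p = n itself when n is prime).
--     p = 2
--     while p * p <= n:
--         if n % p == 0:
--             return (n // p, n - n // p)
--         p += 1
--     return (1, n - 1)
-- ===== Notes on version B (the rewrite author's own statement) =====
-- stated objective: faster
-- what changed: Replaces the O(n) scan over all pairs (a, n-a) minimising lcm with an O(sqrt n) trial-division search for the smallest prime factor p of n, returning (n//p, n-n//p) directly ((1, n-1) when n is prime).
-- outside the precondition, e.g. on ans_slow(1): A raises TypeError, B returns (1, 0)
import Mathlib
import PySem

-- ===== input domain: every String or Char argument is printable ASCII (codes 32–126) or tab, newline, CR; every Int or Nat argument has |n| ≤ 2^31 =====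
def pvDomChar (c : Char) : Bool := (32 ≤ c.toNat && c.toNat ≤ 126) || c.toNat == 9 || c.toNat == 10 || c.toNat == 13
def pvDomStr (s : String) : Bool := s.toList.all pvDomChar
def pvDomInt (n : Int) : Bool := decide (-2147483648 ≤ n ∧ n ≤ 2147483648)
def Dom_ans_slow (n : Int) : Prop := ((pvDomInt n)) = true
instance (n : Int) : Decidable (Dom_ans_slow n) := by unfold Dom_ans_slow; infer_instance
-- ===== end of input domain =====

-- B replaces A's O(n) scan of all pairs with an O(sqrt n) smallest-prime-factor search.

-- ===== PORT A =====
-- lcm(a, b) = a*b // gcd(a, b)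
def pyLcm (a b : Int) : Int := PySem.Int.floordiv (a * b) (Int.gcd a b : Int)

-- loop body: if lcm(a,b) < smallest_lcm (inf = none): update both
def aStep (n : Int) (s : Option Int × Option (Int × Int)) (a : Int) :
    Option Int × Option (Int × Int) :=
  let b := n - a
  let l := pyLcm a b
  if (match s.1 with | none => true | some v => decide (l < v)) = true then
    (some l, some (a, b))
  else s

def ans_slow (n : Int) : List Int :=
  let s := (PySem.List.pyRange 1 n 1).foldl (aStep n) (none, none)
  match s.2 with
  | some (a, b) => PySem.List.sorted [a, b] id
  | none => []   -- Python raises TypeError here (sorted(None)); excluded by Pre_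

-- ===== PORT B =====
-- trial division: first p ≥ 2 with p*p ≤ n and p ∣ n
def bLoop (n : Int) (p : Int) : List Int :=
  if _h : p * p ≤ n then
    if PySem.Int.mod n p = 0 then
      [PySem.Int.floordiv n p, n - PySem.Int.floordiv n p]
    else bLoop n (p + 1)
  else [1, n - 1]
termination_by (n + 2 - p).toNat
decreasing_by
  have hpp : 0 ≤ p * p := mul_self_nonneg p
  by_cases h0 : p ≤ 0
  · omega
  · have : p * 1 ≤ p * p := by
      apply mul_le_mul_of_nonneg_left (by omega) (by omega)
    omega

def ans_slow_alt (n : Int) : List Int := bLoop n 2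

-- ===== PRECONDITION & SPEC =====
-- A raises TypeError for n ≤ 1 (the loop never runs, smallest_pair stays None).
def Pre_ans_slow (n : Int) : Prop := 2 ≤ n
instance (n : Int) : Decidable (Pre_ans_slow n) := by unfold Pre_ans_slow; infer_instance
def pvWitness_ans_slow : Int := (12)

def Spec_ans_slow (n : Int) (out : List Int) : Prop := out = ans_slow_alt n
instance (n : Int) (out : List Int) : Decidable (Spec_ans_slow n out) := by unfold Spec_ans_slow; infer_instance

-- ===== CLAIM (what is proved, stated in full; the proofs are below) =====
def Claim_equal_ans_slow : Prop := ∀ (n : Int), Dom_ans_slow n → Pre_ans_slow n → Spec_ans_slow n (ans_slow n)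

-- ===== LEMMAS AND PROOFS =====

-- sorted on a two-element list
theorem sorted_pair (a b : Int) :
    PySem.List.sorted [a, b] id = if a ≤ b then [a, b] else [b, a] := by
  unfold PySem.List.sorted
  simp [PySem.List.insertBy]
  split_ifs with h h2 h3 <;> first | rfl | omega

-- x*(m-x) ≥ m-1 for 1 ≤ x < m, with equality only at the ends
theorem prod_lb (x m : Nat) (h1 : 1 ≤ x) (h2 : x < m) :
    m - 1 ≤ x * (m - x) ∧ (x * (m - x) = m - 1 → x = 1 ∨ x = m - 1) := by
  obtain ⟨x', rfl⟩ : ∃ x', x = x' + 1 := ⟨x - 1, by omega⟩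
  obtain ⟨y', hy⟩ : ∃ y', m - (x' + 1) = y' + 1 := ⟨m - x' - 2, by omega⟩
  rw [hy]
  have he : (x' + 1) * (y' + 1) = x' * y' + x' + y' + 1 := by ring
  constructor
  · have := Nat.zero_le (x' * y')
    omega
  · intro he2
    rw [he] at he2
    have : x' * y' = 0 := by omega
    rcases Nat.mul_eq_zero.mp this with h | h <;> omega

-- key number-theoretic lemma: every pair (a, N-a) has lcm ≥ N - N/p, p = minFac N,
-- and equality only at a = N/p or a = N - N/p
theorem lcm_pair_key (N a : Nat) (hN : 2 ≤ N) (h1 : 1 ≤ a) (h2 : a < N) :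
    N - N / N.minFac ≤ Nat.lcm a (N - a) ∧
      (Nat.lcm a (N - a) = N - N / N.minFac → a = N / N.minFac ∨ a = N - N / N.minFac) := by
  set p := N.minFac with hp
  have hp2 : 2 ≤ p := (Nat.minFac_prime (by omega)).two_le
  have hpN : p ∣ N := Nat.minFac_dvd N
  set g := Nat.gcd a N with hgdef
  have hg_a : g ∣ a := Nat.gcd_dvd_left a N
  have hg_N : g ∣ N := Nat.gcd_dvd_right a N
  have hgpos : 0 < g := Nat.gcd_pos_of_pos_left N (by omega)
  set m := N / g with hm
  set x := a / g with hx
  have hN' : g * m = N := Nat.mul_div_cancel' hg_N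
  have ha' : g * x = a := Nat.mul_div_cancel' hg_a
  have hx1 : 1 ≤ x := by
    rcases Nat.eq_zero_or_pos x with h | h
    · rw [h, Nat.mul_zero] at ha'; omega
    · exact h
  have hxm : x < m := by
    by_contra hcon
    have : g * m ≤ g * x := Nat.mul_le_mul_left g (by omega)
    omega
  have hm2 : 2 ≤ m := by omega
  have hNa : N - a = g * (m - x) := by
    have : g * (m - x) + g * x = g * m := by
      have : m - x + x = m := by omega
      calc g * (m - x) + g * x = g * ((m - x) + x) := by ring
        _ = g * m := by rw [this]
    omega
  have hgcd2 : Nat.gcd a (N - a) = g := by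
    rw [Nat.gcd_sub_self_right (by omega)]
  have hlcm : Nat.lcm a (N - a) = g * (x * (m - x)) := by
    have hmul := Nat.gcd_mul_lcm a (N - a)
    rw [hgcd2] at hmul
    have : a * (N - a) = g * (g * (x * (m - x))) := by
      rw [hNa, ← ha']; ring
    rw [this] at hmul
    exact Nat.eq_of_mul_eq_mul_left hgpos hmul
  have hmd : m ∣ N := ⟨g, by rw [← hN']; ring⟩
  have hpm : p ≤ m := Nat.minFac_le_of_dvd hm2 hmd
  have hgNm : N / m = g :=
    Nat.div_eq_of_eq_mul_left (by omega) (by omega)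
  have hmg : N / g = m :=
    Nat.div_eq_of_eq_mul_left hgpos (by rw [← hN']; ring)
  have hg_le : g ≤ N / p := by
    rw [← hgNm]; exact Nat.div_le_div_left hpm (by omega)
  have hNp_le : N / p ≤ N := Nat.div_le_self N p
  obtain ⟨hlb, heqc⟩ := prod_lb x m hx1 hxm
  have hmono : g * (m - 1) ≤ g * (x * (m - x)) := Nat.mul_le_mul_left g hlb
  have e1 : g * (m - 1) + g = g * m := by
    have h9 : m - 1 + 1 = m := by omega
    calc g * (m - 1) + g = g * ((m - 1) + 1) := by ring
      _ = g * m := by rw [h9]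
  constructor
  · omega
  · intro heq
    have hgp : g = N / p := by omega
    have hxeq : x * (m - x) = m - 1 := by
      have : g * (x * (m - x)) = g * (m - 1) := by omega
      exact Nat.eq_of_mul_eq_mul_left hgpos this
    have hmp : m = p := by
      rw [← hmg, hgp]
      exact Nat.div_div_self hpN (by omega)
    have e2 : N / p * (p - 1) + N / p = N := by
      have h9 : p - 1 + 1 = p := by omega
      have h10 : N / p * p = N := Nat.div_mul_cancel hpN
      calc N / p * (p - 1) + N / p = N / p * ((p - 1) + 1) := by ring
        _ = N := by rw [h9]; exact h10
    rcases heqc hxeq with h | h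
    · left; rw [← ha', h, Nat.mul_one, hgp]
    · right
      rw [← ha', h, hmp, hgp]
      have : N / p * (p - 1) = N - N / p := by omega
      omega
  -- (end lcm_pair_key)

theorem div_minFac_pos (N : Nat) (hN : 2 ≤ N) : 1 ≤ N / N.minFac :=
  Nat.one_le_div_iff (by have := (Nat.minFac_prime (n := N) (by omega)).two_le; omega)
    |>.mpr (Nat.minFac_le (by omega))

theorem div_minFac_le (N : Nat) (hN : 2 ≤ N) : N / N.minFac ≤ N - N / N.minFac := by
  have hp2 : 2 ≤ N.minFac := (Nat.minFac_prime (by omega)).two_le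
  have h1 : N / N.minFac ≤ N / 2 := Nat.div_le_div_left hp2 (by omega)
  have h2 := Nat.div_add_mod N 2
  have h3 := Nat.mod_lt N (show 0 < 2 by omega)
  omega

theorem lcm_at_div (N : Nat) (hN : 2 ≤ N) :
    Nat.lcm (N / N.minFac) (N - N / N.minFac) = N - N / N.minFac := by
  have hpN : N.minFac ∣ N := Nat.minFac_dvd N
  have hp2 : 2 ≤ N.minFac := (Nat.minFac_prime (by omega)).two_le
  have h10 : N / N.minFac * N.minFac = N := Nat.div_mul_cancel hpN
  have e2 : N / N.minFac * (N.minFac - 1) + N / N.minFac = N := by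
    have h9 : N.minFac - 1 + 1 = N.minFac := by omega
    calc N / N.minFac * (N.minFac - 1) + N / N.minFac
        = N / N.minFac * ((N.minFac - 1) + 1) := by ring
      _ = N := by rw [h9]; exact h10
  have hdvd : N / N.minFac ∣ N - N / N.minFac := ⟨N.minFac - 1, by omega⟩
  exact Nat.lcm_eq_right hdvd

-- cast bridge: pyLcm on positive ints is Nat.lcm
theorem pyLcm_cast (n a : Int) (h1 : 1 ≤ a) (h2 : a < n) :
    pyLcm a (n - a) = ((Nat.lcm a.toNat (n - a).toNat : Nat) : Int) := by
  obtain ⟨A, rfl⟩ : ∃ A : Nat, a = (A : Int) := ⟨a.toNat, by omega⟩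
  obtain ⟨B, hB⟩ : ∃ B : Nat, n - (A : Int) = (B : Int) := ⟨(n - A).toNat, by omega⟩
  rw [pyLcm, hB, Int.gcd_natCast_natCast, ← Nat.cast_mul, PySem.Int.floordiv_natCast]
  simp [Nat.lcm]

-- the fold of A over range(1, m) keeps the first strict-minimum pair
theorem fold_inv (n : Int) (m : Int) (hm2 : 2 ≤ m) (hmn : m ≤ n) :
    ∃ a0 : Int, 1 ≤ a0 ∧ a0 < m ∧
      (PySem.List.pyRange 1 m 1).foldl (aStep n) (none, none)
        = (some (pyLcm a0 (n - a0)), some (a0, n - a0)) ∧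
      (∀ b : Int, 1 ≤ b → b < m → pyLcm a0 (n - a0) ≤ pyLcm b (n - b)) ∧
      (∀ b : Int, 1 ≤ b → b < a0 → pyLcm a0 (n - a0) < pyLcm b (n - b)) := by
  induction m, hm2 using Int.le_induction with
  | base =>
    refine ⟨1, by omega, by omega, ?_, ?_, ?_⟩
    · rw [show (2 : Int) = 1 + 1 by ring, PySem.List.pyRange_one_singleton]
      simp [aStep]
    · intro b hb1 hb2
      have : b = 1 := by omega
      rw [this]
    · intro b hb1 hb2; omega
  | succ m hm ih =>
    obtain ⟨a0, ha1, ha2, hfold, hmin, hstrict⟩ := ih (by omega)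
    rw [PySem.List.pyRange_one_succ_right (by omega), List.foldl_append, hfold]
    by_cases hlt : pyLcm m (n - m) < pyLcm a0 (n - a0)
    · refine ⟨m, by omega, by omega, ?_, ?_, ?_⟩
      · simp [aStep, hlt]
      · intro b hb1 hb2
        by_cases h : b < m
        · exact le_of_lt (lt_of_lt_of_le hlt (hmin b hb1 h))
        · have : b = m := by omega
          rw [this]
      · intro b hb1 hb2
        exact lt_of_lt_of_le hlt (hmin b hb1 hb2)
    · refine ⟨a0, ha1, by omega, ?_, ?_, ?_⟩
      · simp [aStep, hlt]
      · intro b hb1 hb2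
        by_cases h : b < m
        · exact hmin b hb1 h
        · have : b = m := by omega
          rw [this]; omega
      · exact hstrict

-- B's trial-division loop finds N/minFac(N)
theorem bLoop_correct (N : Nat) (hN : 2 ≤ N) (p : Nat) (hp : 2 ≤ p)
    (hinv : ∀ q, 2 ≤ q → q < p → ¬ q ∣ N) :
    bLoop (N : Int) (p : Int) =
      [((N / N.minFac : Nat) : Int), (N : Int) - ((N / N.minFac : Nat) : Int)] := by
  have hpf := Nat.minFac_prime (n := N) (by omega)
  have hp2 : 2 ≤ N.minFac := hpf.two_le
  have hpdvd : N.minFac ∣ N := Nat.minFac_dvd N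
  have hge : p ≤ N.minFac := by
    by_contra hcon
    exact hinv N.minFac hp2 (by omega) hpdvd
  rw [bLoop]
  split
  · next h =>
    have hppN : p * p ≤ N := by exact_mod_cast h
    rw [show PySem.Int.mod (N : Int) (p : Int) = ((N % p : Nat) : Int) from
      PySem.Int.mod_natCast N p]
    by_cases hdvd : p ∣ N
    · have hmod : N % p = 0 := Nat.eq_zero_of_dvd_of_lt hdvd |> fun _ => Nat.mod_eq_zero_of_dvd hdvd
      have hpeq : N.minFac = p :=
        le_antisymm (Nat.minFac_le_of_dvd hp hdvd) hge
      have hc : ((N % p : Nat) : Int) = 0 := by rw [hmod]; simp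
      rw [if_pos hc, PySem.Int.floordiv_natCast, hpeq]
    · have hmod : N % p ≠ 0 := fun h0 => hdvd (Nat.dvd_of_mod_eq_zero h0)
      rw [if_neg (by exact_mod_cast hmod)]
      have : (p : Int) + 1 = ((p + 1 : Nat) : Int) := by push_cast; ring
      rw [this]
      exact bLoop_correct N hN (p + 1) (by omega) (fun q hq1 hq2 hq3 => by
        rcases Nat.lt_succ_iff_lt_or_eq.mp hq2 with h | h
        · exact hinv q hq1 h hq3
        · subst h; exact hdvd hq3)
  · next h =>
    have hppN : N < p * p := by
      by_contra hcon
      exact h (by exact_mod_cast (not_lt.mp hcon))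
    have hNprime : N.Prime := by
      by_contra hnp
      have := Nat.minFac_sq_le_self (n := N) (by omega) hnp
      have h2 : p * p ≤ N.minFac * N.minFac :=
        Nat.mul_le_mul hge hge
      rw [pow_two] at this
      omega
    have : N.minFac = N := hNprime.minFac_eq
    rw [this, Nat.div_self (by omega)]
    push_cast
    ring_nf
termination_by N + 2 - p
decreasing_by
  have hx : p * 1 ≤ p * p := Nat.mul_le_mul_left p (by omega)
  omega

-- ===== VERDICT (by name: the statement is the Claim_ definition above) =====
theorem ans_slow_spec : Claim_equal_ans_slow := by
  intro n _ hpre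
  unfold Pre_ans_slow at hpre
  unfold Spec_ans_slow
  set N := n.toNat with hNdef
  have hN2 : 2 ≤ N := by omega
  have hn : ((N : Nat) : Int) = n := by omega
  have hp2 : 2 ≤ N.minFac := (Nat.minFac_prime (n := N) (by omega)).two_le
  -- B's side: trial division returns the minFac pair
  have hB : ans_slow_alt n = [((N / N.minFac : Nat) : Int), n - ((N / N.minFac : Nat) : Int)] := by
    unfold ans_slow_alt
    rw [← hn, show ((2 : Int)) = (((2 : Nat) : Nat) : Int) by simp]
    rw [bLoop_correct N hN2 2 (by omega) (fun q h1 h2 => by omega)]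
  -- A's side: the fold keeps the first minimiser
  obtain ⟨a0, h1, h2, hfold, hmin, hstrict⟩ := fold_inv n n hpre le_rfl
  have hcast : ∀ b : Int, 1 ≤ b → b < n →
      pyLcm b (n - b) = ((Nat.lcm b.toNat (N - b.toNat) : Nat) : Int) := by
    intro b hb1 hb2
    rw [pyLcm_cast n b hb1 hb2, show (n - b).toNat = N - b.toNat by omega]
  have hb1 : 1 ≤ N / N.minFac := div_minFac_pos N hN2
  have hb2 : N / N.minFac < N := Nat.div_lt_self (by omega) (by omega)
  have hA1 : 1 ≤ a0.toNat := by omega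
  have hA2 : a0.toNat < N := by omega
  have h_at : Nat.lcm (N / N.minFac) (N - N / N.minFac) = N - N / N.minFac := lcm_at_div N hN2
  have hminN : Nat.lcm a0.toNat (N - a0.toNat) = N - N / N.minFac := by
    have hle := hmin ((N / N.minFac : Nat) : Int) (by omega) (by omega)
    rw [hcast a0 h1 h2, hcast ((N / N.minFac : Nat) : Int) (by omega) (by omega)] at hle
    simp only [Int.toNat_natCast] at hle
    rw [h_at] at hle
    have hge := (lcm_pair_key N a0.toNat hN2 hA1 hA2).1
    have := Nat.cast_le (α := Int) |>.mp hle
    omega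
  have hA : a0.toNat = N / N.minFac := by
    rcases (lcm_pair_key N a0.toNat hN2 hA1 hA2).2 hminN with h | h
    · exact h
    · by_cases hsame : N / N.minFac = N - N / N.minFac
      · omega
      · exfalso
        have hdle := div_minFac_le N hN2
        have hlt : ((N / N.minFac : Nat) : Int) < a0 := by omega
        have hs := hstrict ((N / N.minFac : Nat) : Int) (by omega) hlt
        rw [hcast a0 h1 h2, hcast ((N / N.minFac : Nat) : Int) (by omega) (by omega)] at hs
        simp only [Int.toNat_natCast] at hs
        rw [h_at, hminN] at hs
        omega
  have ha0 : a0 = ((N / N.minFac : Nat) : Int) := by omega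
  have hle2 : a0 ≤ n - a0 := by
    have := div_minFac_le N hN2
    omega
  unfold ans_slow
  rw [hfold]
  simp only []
  rw [sorted_pair, if_pos hle2, hB, ha0]
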